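-- pv_equiv track=rewrite | github.com/Camilo-6/PrimerSemestre | ED/Practicas ED/ED-P1/practica1.py | dibuja_triangulo
-- ===== SOURCE A (Python) =====
-- def dibuja_triangulo(n):
--     cadenita = ""
--     for triangulo in range(1,n+1):
--         for renglones in range(1,triangulo+1):
--             for espacios in range(n-renglones):
--                 cadenita += " "
--             for estrellitas in range(renglones):
--                 cadenita += "* "
--             cadenita += "\n"
--         cadenita += "\n"
--     return cadenita
-- ===== SOURCE B (Python) =====
-- def dibuja_triangulo(n):
--     # Precompute the n shared row strings once, then assemble each triangle
--     # as a prefix of that table plus a blank line; join at the end.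
--     rows = [" " * (n - r) + "* " * r + "\n" for r in range(1, n + 1)]
--     parts = []
--     for t in range(1, n + 1):
--         parts += rows[:t]
--         parts.append("\n")
--     return "".join(parts)
-- ===== Notes on version B (the rewrite author's own statement) =====
-- stated objective: alternative
-- what changed: Replaces the triple nested character-appending loops by a precomputed table of the n row strings, each triangle emitted as a prefix of that table and joined once at the end.
import Mathlib
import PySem

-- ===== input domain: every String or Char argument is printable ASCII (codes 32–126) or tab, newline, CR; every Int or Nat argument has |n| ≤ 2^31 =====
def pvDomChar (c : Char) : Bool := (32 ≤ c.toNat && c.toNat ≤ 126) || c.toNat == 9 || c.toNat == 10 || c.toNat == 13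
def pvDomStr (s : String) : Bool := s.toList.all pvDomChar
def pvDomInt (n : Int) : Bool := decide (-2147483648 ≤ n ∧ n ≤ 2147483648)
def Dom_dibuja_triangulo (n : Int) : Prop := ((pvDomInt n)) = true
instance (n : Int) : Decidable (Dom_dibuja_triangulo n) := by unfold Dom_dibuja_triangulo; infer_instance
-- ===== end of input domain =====

-- B replaces A's triple nested character-appending loops by a precomputed table of
-- row strings, each triangle emitted as a prefix of that table and joined once.


-- ===== PORT A =====
-- cadenita carried as a List Char; each += appends that string's characters.
def dibuja_triangulo (n : Int) : String :=
  String.mk <|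
    (PySem.List.pyRange 1 (n + 1)).foldl (fun cadenita triangulo =>
      ((PySem.List.pyRange 1 (triangulo + 1)).foldl (fun cad renglones =>
        ((PySem.List.pyRange 0 renglones).foldl (fun c _ => c ++ ['*', ' '])
          ((PySem.List.pyRange 0 (n - renglones)).foldl (fun c _ => c ++ [' ']) cad))
        ++ ['\n']) cadenita) ++ ['\n']) []

-- ===== PORT B =====
-- " " * (n - r) + "* " * r + "\n"  (Python string repetition = flattened replicate)
def pvRow (n r : Int) : List Char :=
  (List.replicate (n - r).toNat [' ']).flatten
    ++ (List.replicate r.toNat ['*', ' ']).flatten ++ ['\n']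

def dibuja_triangulo_alt (n : Int) : String :=
  let rows := (PySem.List.pyRange 1 (n + 1)).map (pvRow n)
  let parts := (PySem.List.pyRange 1 (n + 1)).foldl
      (fun ps t => ps ++ rows.take t.toNat ++ [['\n']]) ([] : List (List Char))
  String.mk parts.flatten

-- ===== PRECONDITION & SPEC =====
def Spec_dibuja_triangulo (n : Int) (out : String) : Prop := out = dibuja_triangulo_alt n
instance (n : Int) (out : String) : Decidable (Spec_dibuja_triangulo n out) := by unfold Spec_dibuja_triangulo; infer_instance

-- ===== CLAIM (what is proved, stated in full; the proofs are below) =====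
def Claim_equal_dibuja_triangulo : Prop := ∀ (n : Int), Dom_dibuja_triangulo n → Spec_dibuja_triangulo n (dibuja_triangulo n)

-- ===== LEMMAS AND PROOFS =====

-- appending a fixed chunk once per element
lemma pv_foldl_const {α : Type} (l : List α) (x : List Char) (acc : List Char) :
    l.foldl (fun c _ => c ++ x) acc = acc ++ (List.replicate l.length x).flatten := by
  induction l generalizing acc with
  | nil => simp
  | cons a t ih => simp [ih, List.replicate_succ]

lemma pv_len_pyRange0 (k : Int) : (PySem.List.pyRange 0 k).length = k.toNat := by
  rcases le_or_gt k 0 with h | h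
  · have : k.toNat = 0 := by omega
    rw [this]
    have : PySem.List.pyRange 0 k = [] := by
      simp [PySem.List.pyRange]; omega
    simp [this]
  · obtain ⟨m, rfl⟩ : ∃ m : Nat, k = (m : Int) := ⟨k.toNat, by omega⟩
    simp [PySem.List.pyRange_zero_natCast]

lemma pv_len_pyRange1 (m : Nat) : (PySem.List.pyRange 1 (1 + (m : Int))).length = m := by
  induction m with
  | zero => decide
  | succ k ih =>
      have h : (1 + ((k + 1 : Nat) : Int)) = (1 + (k : Int)) + 1 := by push_cast; ring
      rw [h, PySem.List.pyRange_one_succ_right (by omega)]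
      simp [ih]

lemma pv_take_pyRange (m k : Nat) :
    (PySem.List.pyRange 1 (1 + (m : Int) + (k : Int))).take m = PySem.List.pyRange 1 (1 + (m : Int)) := by
  induction k with
  | zero =>
      simp only [Int.natCast_zero, add_zero]
      exact List.take_of_length_le (by rw [pv_len_pyRange1])
  | succ k ih =>
      have h : (1 + (m : Int) + ((k + 1 : Nat) : Int)) = (1 + ((m + k : Nat) : Int)) + 1 := by
        push_cast; ring
      have h2 : (1 : Int) + ((m + k : Nat) : Int) = 1 + (m : Int) + (k : Int) := by push_cast; ring
      rw [h, PySem.List.pyRange_one_succ_right (by omega),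
        List.take_append_of_le_length (by rw [pv_len_pyRange1]; omega), h2]
      exact ih

lemma pv_flatten_flatMap {α : Type} (g : α → List (List Char)) (l : List α) :
    (l.flatMap g).flatten = l.flatMap (fun t => (g t).flatten) := by
  induction l with
  | nil => simp
  | cons a t ih => simp [ih]

-- one row of A's inner loops equals appending pvRow
lemma pv_row (n r : Int) (cad : List Char) :
    ((PySem.List.pyRange 0 r).foldl (fun c _ => c ++ ['*', ' '])
      ((PySem.List.pyRange 0 (n - r)).foldl (fun c _ => c ++ [' ']) cad)) ++ ['\n']
    = cad ++ pvRow n r := by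
  rw [pv_foldl_const, pv_foldl_const, pv_len_pyRange0, pv_len_pyRange0, pvRow]
  simp

-- one triangle of A equals the flattened row prefix
lemma pv_triangle (n t : Int) (cad : List Char) :
    ((PySem.List.pyRange 1 (t + 1)).foldl (fun cad renglones =>
        ((PySem.List.pyRange 0 renglones).foldl (fun c _ => c ++ ['*', ' '])
          ((PySem.List.pyRange 0 (n - renglones)).foldl (fun c _ => c ++ [' ']) cad))
        ++ ['\n']) cad) ++ ['\n']
    = cad ++ ((PySem.List.pyRange 1 (t + 1)).flatMap (pvRow n) ++ ['\n']) := by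
  rw [PySem.List.foldl_congr_mem _ _ (fun cad r => cad ++ pvRow n r) cad
        (fun acc x _ => pv_row n x acc),
      PySem.List.foldl_append_eq_flatMap]
  simp

-- the row-table prefix is the range of rows of the t-th triangle
lemma pv_prefix (n t : Int) (h1 : 1 ≤ t) (h2 : t ≤ n) :
    ((PySem.List.pyRange 1 (n + 1)).map (pvRow n)).take t.toNat
    = (PySem.List.pyRange 1 (t + 1)).map (pvRow n) := by
  rw [← List.map_take]
  congr 1
  have hm : n + 1 = 1 + (t.toNat : Int) + ((n - t).toNat : Int) := by omega
  have ht : t + 1 = 1 + (t.toNat : Int) := by omega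
  rw [hm, ht, pv_take_pyRange]

-- ===== VERDICT (by name: the statement is the Claim_ definition above) =====
theorem dibuja_triangulo_spec : Claim_equal_dibuja_triangulo := by
  intro n _
  show dibuja_triangulo n = dibuja_triangulo_alt n
  unfold dibuja_triangulo dibuja_triangulo_alt
  apply congrArg String.mk
  rw [PySem.List.foldl_congr_mem _ _
        (fun cad t => cad ++ ((PySem.List.pyRange 1 (t + 1)).flatMap (pvRow n) ++ ['\n'])) []
        (fun acc x _ => pv_triangle n x acc),
      PySem.List.foldl_append_eq_flatMap,
      PySem.List.foldl_congr_mem _ _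
        (fun ps t => ps ++ (((PySem.List.pyRange 1 (n + 1)).map (pvRow n)).take t.toNat ++ [['\n']]))
        ([] : List (List Char)) (fun acc x _ => by rw [List.append_assoc]),
      PySem.List.foldl_append_eq_flatMap]
  simp only [List.nil_append]
  rw [pv_flatten_flatMap]
  apply List.flatMap_congr
  intro t ht
  rw [PySem.List.mem_pyRange_one] at ht
  rw [pv_prefix n t ht.1 (by omega)]
  simp [List.flatMap_def]
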